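-- pv_equiv track=rewrite | github.com/rohanfatehchandka/Email-spam | flask/main.py | extractUrl
-- ===== SOURCE A (Python) =====
-- def extractUrl(data):
--     url = str(data)
--     extractSlash = url.split('/')
--     result = []
--     for i in extractSlash:
--         extractDash = str(i).split('-')
--         dotExtract = []
--         for j in range(0, len(extractDash)):
--             extractDot = str(extractDash[j]).split('.')
--             dotExtract += extractDot
--         result += extractDash + dotExtract
--     result = list(set(result))
--     return result
-- ===== SOURCE B (Python) =====
-- def _split(s, seps):
--     # one pass over s: cut a new token at every separator character
--     parts = []
--     cur = []
--     for ch in s: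
--         if ch in seps:
--             parts.append(''.join(cur))
--             cur = []
--         else:
--             cur.append(ch)
--     parts.append(''.join(cur))
--     return parts
--
--
-- def extractUrl(data):
--     url = str(data)
--     dash = _split(url, '/-')
--     full = _split(url, '/-.')
--     return sorted(set(dash) | set(full))
-- ===== Notes on version B (the rewrite author's own statement) =====
-- stated objective: alternative
-- what changed: A's nested accumulating splits (split on '/', then per piece on '-', then per dash-piece on '.') are replaced by two independent single-pass character scanners (tokens split on '/-' and on '/-.') whose union is the same set; the result list of list(set(...)) is emitted in sorted order, a determinate representative of the hash-order list (outputs are compared as sets).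
import Mathlib
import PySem

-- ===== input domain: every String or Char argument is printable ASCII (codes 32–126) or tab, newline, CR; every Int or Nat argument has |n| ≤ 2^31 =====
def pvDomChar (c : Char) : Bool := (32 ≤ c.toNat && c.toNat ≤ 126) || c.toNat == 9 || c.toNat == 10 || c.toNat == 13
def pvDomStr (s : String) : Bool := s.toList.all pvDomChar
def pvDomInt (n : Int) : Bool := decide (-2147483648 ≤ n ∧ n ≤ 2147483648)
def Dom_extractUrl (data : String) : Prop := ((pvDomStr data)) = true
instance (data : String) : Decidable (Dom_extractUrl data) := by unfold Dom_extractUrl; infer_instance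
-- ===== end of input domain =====

-- B replaces A's nested accumulating splits by two independent single-pass character scanners whose
-- set union is the same token set. Both Pythons end in list(set(...)), whose order is CPython hash
-- order; both ports emit that set in sorted order, a determinate representative (outputs are
-- compared as sets, so no order claim is made beyond that).

-- ===== PORT A =====
def extractUrl (data : String) : List String :=
  let url := data.toList
  let extractSlash := PySem.Chars.splitOn url ['/']          -- url.split('/')
  let result := extractSlash.foldl (fun result i =>
    let extractDash := PySem.Chars.splitOn i ['-']           -- str(i).split('-')
    let dotExtract := (PySem.List.pyRange 0 (PySem.List.len extractDash)).foldl
      (fun dotExtract j =>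
        dotExtract ++ PySem.Chars.splitOn (PySem.List.pyGetD extractDash j []) ['.']) []
    result ++ (extractDash ++ dotExtract)) []
  -- list(set(result)) iterated into a list: emitted as the sorted representative of the set
  (PySem.List.sorted (PySem.Set.ofList result) (fun x => x) false).map String.ofList

-- ===== PORT B =====
-- _split(s, seps): one pass, state (parts, cur)
def pvSplit (s : List Char) (seps : List Char) : List (List Char) :=
  let st := s.foldl (fun (st : List (List Char) × List Char) ch =>
    if ch ∈ seps then (st.1 ++ [st.2], ([] : List Char)) else (st.1, st.2 ++ [ch])) ([], [])
  st.1 ++ [st.2]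

def extractUrl_alt (data : String) : List String :=
  let url := data.toList
  let dash := pvSplit url ['/', '-']
  let full := pvSplit url ['/', '-', '.']
  -- sorted(set(dash) | set(full))
  (PySem.List.sorted (PySem.Set.union (PySem.Set.ofList dash) (PySem.Set.ofList full))
    (fun x => x) false).map String.ofList

-- ===== PRECONDITION & SPEC =====
def Spec_extractUrl (data : String) (out : List String) : Prop := out = extractUrl_alt data
instance (data : String) (out : List String) : Decidable (Spec_extractUrl data out) := by unfold Spec_extractUrl; infer_instance

-- ===== CLAIM (what is proved, stated in full; the proofs are below) =====
def Claim_equal_extractUrl : Prop := ∀ (data : String), Dom_extractUrl data → Spec_extractUrl data (extractUrl data)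

-- ===== LEMMAS AND PROOFS =====

/-- Reference splitter: split a character list at every character of `seps`. -/
def pvTok (seps : List Char) : List Char → List (List Char)
  | [] => [[]]
  | c :: r =>
    let t := pvTok seps r
    if c ∈ seps then [] :: t else (c :: t.headD []) :: t.tail

theorem pvTok_ne_nil (seps : List Char) (cs : List Char) : pvTok seps cs ≠ [] := by
  cases cs with
  | nil => simp [pvTok]
  | cons c r => simp only [pvTok]; split <;> simp

theorem pvTok_cons_exists (seps : List Char) (cs : List Char) :
    ∃ h t, pvTok seps cs = h :: t := by
  cases hx : pvTok seps cs with
  | nil => exact absurd hx (pvTok_ne_nil _ _)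
  | cons a b => exact ⟨a, b, rfl⟩

theorem splitOn_go_singleton (d : Char) :
    ∀ (fuel : Nat) (l cur : List Char) (acc : List (List Char)), l.length < fuel →
      PySem.Chars.splitOn.go [d] fuel l cur acc
        = acc.reverse ++ (pvTok [d] l).modifyHead (fun x => cur.reverse ++ x) := by
  intro fuel
  induction fuel with
  | zero => intro l cur acc h; omega
  | succ f ih =>
    intro l cur acc h
    cases l with
    | nil => simp [PySem.Chars.splitOn.go, pvTok]
    | cons c rest =>
      by_cases hc : c = d
      · subst hc
        have hpre : List.isPrefixOf [c] (c :: rest) = true := by simp [List.isPrefixOf]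
        rw [PySem.Chars.splitOn.go]
        simp only [hpre, if_true]
        have hd : List.drop [c].length (c :: rest) = rest := rfl
        rw [hd, ih rest [] (cur.reverse :: acc) (by simpa using Nat.lt_of_succ_lt_succ h)]
        obtain ⟨h1, t1, ht⟩ := pvTok_cons_exists [c] rest
        simp [pvTok, ht]
      · have hpre : List.isPrefixOf [d] (c :: rest) = false := by
          simp [List.isPrefixOf]; exact fun hh => hc hh.symm
        rw [PySem.Chars.splitOn.go]
        simp only [hpre]
        rw [if_neg (by simp)]
        rw [ih rest (c :: cur) acc (by simpa using Nat.lt_of_succ_lt_succ h)]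
        obtain ⟨h1, t1, ht⟩ := pvTok_cons_exists [d] rest
        simp [pvTok, ht, hc]

theorem splitOn_singleton (d : Char) (cs : List Char) :
    PySem.Chars.splitOn cs [d] = pvTok [d] cs := by
  unfold PySem.Chars.splitOn
  rw [splitOn_go_singleton d (cs.length + 1) cs [] [] (Nat.lt_succ_self _)]
  obtain ⟨h1, t1, ht⟩ := pvTok_cons_exists [d] cs
  simp [ht]

theorem pvSplit_scan (seps : List Char) :
    ∀ (cs : List Char) (p : List (List Char)) (cur : List Char),
      (cs.foldl (fun (st : List (List Char) × List Char) ch =>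
        if ch ∈ seps then (st.1 ++ [st.2], ([] : List Char)) else (st.1, st.2 ++ [ch])) (p, cur)).1
      ++ [(cs.foldl (fun (st : List (List Char) × List Char) ch =>
        if ch ∈ seps then (st.1 ++ [st.2], ([] : List Char)) else (st.1, st.2 ++ [ch])) (p, cur)).2]
      = p ++ (pvTok seps cs).modifyHead (fun x => cur ++ x) := by
  intro cs
  induction cs with
  | nil => intro p cur; simp [pvTok]
  | cons c r ih =>
    intro p cur
    obtain ⟨h1, t1, ht⟩ := pvTok_cons_exists seps r
    by_cases hc : c ∈ seps
    · simp only [List.foldl_cons, if_pos hc]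
      rw [ih (p ++ [cur]) []]
      simp [pvTok, hc, ht]
    · simp only [List.foldl_cons, if_neg hc]
      rw [ih p (cur ++ [c])]
      simp [pvTok, hc, ht]

theorem pvSplit_eq (s seps : List Char) : pvSplit s seps = pvTok seps s := by
  unfold pvSplit
  rw [pvSplit_scan seps s [] []]
  obtain ⟨h1, t1, ht⟩ := pvTok_cons_exists seps s
  simp [ht]

theorem pvTok_compose (s1 s2 : List Char) :
    ∀ cs : List Char, (pvTok s1 cs).flatMap (pvTok s2) = pvTok (s1 ++ s2) cs := by
  intro cs
  induction cs with
  | nil => simp [pvTok]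
  | cons c r ih =>
    obtain ⟨h1, t1, ht1⟩ := pvTok_cons_exists s1 r
    by_cases hc1 : c ∈ s1
    · simp only [pvTok, if_pos hc1, if_pos (List.mem_append.mpr (Or.inl hc1))]
      simpa [pvTok] using ih
    · by_cases hc2 : c ∈ s2
      · simp only [pvTok, if_neg hc1, if_pos (List.mem_append.mpr (Or.inr hc2)), ht1]
        obtain ⟨h2, t2, ht2⟩ := pvTok_cons_exists s2 h1
        rw [← ih]
        simp [pvTok, hc2, ht1, ht2]
      · have hcu : c ∉ s1 ++ s2 := by simp [hc1, hc2]
        simp only [pvTok, if_neg hc1, if_neg hcu, ht1]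
        obtain ⟨h2, t2, ht2⟩ := pvTok_cons_exists s2 h1
        rw [← ih]
        simp [pvTok, hc2, ht1, ht2]

theorem sortedId_eq_of_perm (xs ys : List (List Char)) (hp : xs.Perm ys) :
    PySem.List.sorted xs (fun x => x) false = PySem.List.sorted ys (fun x => x) false := by
  have e := PySem.List.sorted_eq_sorted_of_perm xs ys (fun x => x) (fun a b h => h) hp
  convert e using 2

theorem inner_eq (xs : List (List Char)) :
    (PySem.List.pyRange 0 (PySem.List.len xs)).foldl
      (fun acc j => acc ++ pvTok ['.'] (PySem.List.pyGetD xs j [])) []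
      = xs.flatMap (pvTok ['.']) := by
  rw [PySem.List.foldl_pyRange_pyGetD xs [] (fun acc i => acc ++ pvTok ['.'] i) [] (le_refl 0)]
  simp [List.flatMap_def]

theorem extractUrl_eq_alt (data : String) : extractUrl data = extractUrl_alt data := by
  unfold extractUrl extractUrl_alt
  apply congrArg (List.map String.ofList)
  simp only [pvSplit_eq, splitOn_singleton]
  simp only [inner_eq]
  simp only [PySem.List.foldl_append_eq_flatMap, List.nil_append]
  apply sortedId_eq_of_perm
  rw [List.perm_ext_iff_of_nodup (PySem.Set.nodup_ofList _)
    (PySem.Set.nodup_union _ _ (PySem.Set.nodup_ofList _))]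
  intro x
  rw [PySem.Set.mem_union, PySem.Set.mem_ofList, PySem.Set.mem_ofList, PySem.Set.mem_ofList]
  have hdash : pvTok ['/', '-'] data.toList
      = (pvTok ['/'] data.toList).flatMap (pvTok ['-']) :=
    (pvTok_compose ['/'] ['-'] data.toList).symm
  have hfull : pvTok ['/', '-', '.'] data.toList
      = (pvTok ['/', '-'] data.toList).flatMap (pvTok ['.']) :=
    (pvTok_compose ['/', '-'] ['.'] data.toList).symm
  rw [hfull, hdash]
  simp only [List.mem_flatMap, List.mem_append]
  constructor
  · rintro ⟨i, hi, hx | hx⟩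
    · exact Or.inl ⟨i, hi, hx⟩
    · rcases hx with ⟨d, hd, hx⟩
      exact Or.inr ⟨d, ⟨i, hi, hd⟩, hx⟩
  · rintro (⟨i, hi, hx⟩ | ⟨d, ⟨i, hi, hd⟩, hx⟩)
    · exact ⟨i, hi, Or.inl hx⟩
    · exact ⟨i, hi, Or.inr ⟨d, hd, hx⟩⟩

-- ===== VERDICT (by name: the statement is the Claim_ definition above) =====
theorem extractUrl_spec : Claim_equal_extractUrl := by
  intro data _
  exact extractUrl_eq_alt data
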